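-- pv_equiv track=rewrite | github.com/BCastagninoRossi/PC | GUIAS EJERCICIOS/03-Condicionales.py | pending_year
-- ===== SOURCE A (Python) =====
-- def daymonth (year: int, month: int)-> int:
--     if month != 2:
--         if month < 8:
--             if month % 2 == 0:
--                 return 30
--             else:
--                 return 31
--         else:
--             if month % 2 == 0:
--                 return 31
--             else:
--                 return 30
--     else:
--         if year % 4 == 0 and (year % 100 != 0 or year % 400 == 0):
--             return 29
--         else:
--             return 28
--
-- def valid_date (d: int, m: int, a: int)->bool:
--     days = daymonth(a, m)
--     if d <= days:
--         return True
--     else: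
--         return False
--
-- def pending_month (d: int, m: int, a: int)-> int:
--     assert valid_date(d, m, a) == True, 'Ha ingresado una fecha inválida'
--     days = daymonth(a, m)
--     pending = days - d
--     return pending
--
-- def pending_year(d: int, m: int, a: int)-> int:
--     assert valid_date(d, m, a) == True, 'Ha ingresado una fecha inválida'
--     current = pending_month(d, m, a)
--     d = 0
--     while m < 12:
--         m+=1
--         d+= daymonth(a, m)
--     return current + d
-- ===== SOURCE B (Python) =====
-- # B: closed-form arithmetic (no month loop): days left in the current month plus a
-- # counting formula for the days of the months after it. Same assertion as A.
--
-- def daymonth(year, month):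
--     if month == 2:
--         return 28 + (year % 4 == 0 and (year % 100 != 0 or year % 400 == 0))
--     return 30 + ((month % 2) ^ (month >= 8))
--
-- def valid_date(d, m, a):
--     return d <= daymonth(a, m)
--
-- def rest_of_year(a, m):
--     # sum of daymonth(a, k) for k = m+1 .. 12, in closed form
--     if m >= 12:
--         return 0
--     lo = m + 1
--     months = 12 - m
--     odd_long = (4 - lo // 2) if lo <= 7 else 0      # 31-day months among lo..7 (odd ones)
--     even_long = 6 - (max(lo, 8) - 1) // 2           # 31-day months among 8..12 (even ones)
--     feb = daymonth(a, 2) if lo <= 2 else 0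
--     return 30 * (months - (lo <= 2)) + odd_long + even_long + feb
--
-- def pending_year(d, m, a):
--     assert valid_date(d, m, a) == True, 'Ha ingresado una fecha inválida'
--     return daymonth(a, m) - d + rest_of_year(a, m)
-- ===== Notes on version B (the rewrite author's own statement) =====
-- stated objective: faster
-- what changed: Replaces A's month-by-month while loop (summing daymonth over all months after m) with an O(1) closed-form count: days left in the current month plus an arithmetic formula counting the 31-day/30-day/February months after m.
import Mathlib
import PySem

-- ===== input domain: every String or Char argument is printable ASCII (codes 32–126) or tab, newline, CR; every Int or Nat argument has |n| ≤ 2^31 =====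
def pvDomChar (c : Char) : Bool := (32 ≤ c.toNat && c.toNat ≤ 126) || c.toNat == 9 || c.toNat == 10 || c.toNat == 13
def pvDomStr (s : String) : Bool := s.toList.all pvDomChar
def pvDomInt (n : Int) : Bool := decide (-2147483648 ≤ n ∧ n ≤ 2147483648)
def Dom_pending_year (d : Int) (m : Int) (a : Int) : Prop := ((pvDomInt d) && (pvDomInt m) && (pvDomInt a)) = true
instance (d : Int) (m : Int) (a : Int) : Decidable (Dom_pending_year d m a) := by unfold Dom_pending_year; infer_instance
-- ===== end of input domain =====

-- B replaces A's while loop over the remaining months by a closed-form count (objective: faster).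
-- The failing 'assert' of A (an AssertionError) is captured by Pre_pending_year; B keeps the same assertion.

-- ===== PORT A =====
def daymonth (year : Int) (month : Int) : Int :=
  if month ≠ 2 then
    if month < 8 then
      (if PySem.Int.mod month 2 = 0 then 30 else 31)
    else
      (if PySem.Int.mod month 2 = 0 then 31 else 30)
  else
    if PySem.Int.mod year 4 = 0 ∧ (PySem.Int.mod year 100 ≠ 0 ∨ PySem.Int.mod year 400 = 0) then 29 else 28

-- the assert succeeds exactly on Pre_pending_year; under it pending_month returns days - d
def pending_month (d : Int) (m : Int) (a : Int) : Int :=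
  daymonth a m - d

-- the 'while m < 12: m += 1; d += daymonth(a, m)' loop (d starts at 0)
def pyWhile (a : Int) (m : Int) (dAcc : Int) : Int :=
  if m < 12 then pyWhile a (m + 1) (dAcc + daymonth a (m + 1)) else dAcc
termination_by (12 - m).toNat
decreasing_by omega

def pending_year (d : Int) (m : Int) (a : Int) : Int :=
  pending_month d m a + pyWhile a m 0

-- ===== PORT B =====
def daymonth_b (year : Int) (month : Int) : Int :=
  if month = 2 then
    28 + (if PySem.Int.mod year 4 = 0 ∧ (PySem.Int.mod year 100 ≠ 0 ∨ PySem.Int.mod year 400 = 0) then 1 else 0)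
  else
    30 + PySem.Int.bxor (PySem.Int.mod month 2) (if 8 ≤ month then 1 else 0)

-- closed form of 'sum of daymonth(a, k) for k = m+1 .. 12'
def rest_of_year (a : Int) (m : Int) : Int :=
  if 12 ≤ m then 0
  else
    let lo := m + 1
    let months := 12 - m
    let odd_long := if lo ≤ 7 then 4 - PySem.Int.floordiv lo 2 else 0
    let even_long := 6 - PySem.Int.floordiv (max lo 8 - 1) 2
    let feb := if lo ≤ 2 then daymonth_b a 2 else 0
    30 * (months - (if lo ≤ 2 then 1 else 0)) + odd_long + even_long + feb

def pending_year_alt (d : Int) (m : Int) (a : Int) : Int :=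
  daymonth_b a m - d + rest_of_year a m

-- ===== PRECONDITION & SPEC =====
-- Pre_: exactly the inputs on which A's assert succeeds (d does not exceed the month's day count);
-- elsewhere the Python A raises AssertionError.
def Pre_pending_year (d : Int) (m : Int) (a : Int) : Prop :=
  d ≤ (if m = 2 then
        (if PySem.Int.mod a 4 = 0 ∧ (PySem.Int.mod a 100 ≠ 0 ∨ PySem.Int.mod a 400 = 0) then 29 else 28)
      else if m < 8 then (if PySem.Int.mod m 2 = 0 then 30 else 31)
      else (if PySem.Int.mod m 2 = 0 then 31 else 30))
instance (d : Int) (m : Int) (a : Int) : Decidable (Pre_pending_year d m a) := by unfold Pre_pending_year; infer_instance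
def pvWitness_pending_year : Int × Int × Int := (5, 3, 2024)

def Spec_pending_year (d : Int) (m : Int) (a : Int) (out : Int) : Prop := out = pending_year_alt d m a
instance (d : Int) (m : Int) (a : Int) (out : Int) : Decidable (Spec_pending_year d m a out) := by unfold Spec_pending_year; infer_instance

-- ===== CLAIM (what is proved, stated in full; the proofs are below) =====
def Claim_equal_pending_year : Prop := ∀ (d : Int) (m : Int) (a : Int), Dom_pending_year d m a → Pre_pending_year d m a → Spec_pending_year d m a (pending_year d m a)

-- ===== LEMMAS AND PROOFS =====

lemma daymonth_agree (a k : Int) : daymonth a k = daymonth_b a k := by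
  unfold daymonth daymonth_b
  by_cases h2 : k = 2
  · subst h2; norm_num; split_ifs <;> norm_num
  · have h0 : 0 ≤ PySem.Int.mod k 2 := PySem.Int.mod_nonneg k (by norm_num)
    have h1 : PySem.Int.mod k 2 < 2 := PySem.Int.mod_lt k (by norm_num)
    simp only [h2, ne_eq, not_false_iff, if_true, if_false]
    rcases (by omega : PySem.Int.mod k 2 = 0 ∨ PySem.Int.mod k 2 = 1) with h | h <;>
      rw [h] <;> split_ifs <;> first | decide | omega

lemma rest_base (a m : Int) (h : 12 ≤ m) : rest_of_year a m = 0 := by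
  unfold rest_of_year; simp [h]

lemma rest_step (a m : Int) (h : m < 12) :
    rest_of_year a m = daymonth_b a (m + 1) + rest_of_year a (m + 1) := by
  have ediv2 : ∀ x : Int, PySem.Int.floordiv x 2 = x / 2 :=
    fun x => PySem.Int.floordiv_eq_ediv_of_pos (by norm_num)
  have emod2 : ∀ x : Int, PySem.Int.mod x 2 = x % 2 :=
    fun x => PySem.Int.mod_eq_emod_of_pos (by norm_num)
  have hbx : ∀ x y : Int, x % 2 = x % 2 → PySem.Int.bxor (x % 2) (if 8 ≤ y then 1 else 0)
      = (if 8 ≤ y then 1 - x % 2 else x % 2) := by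
    intro x y _
    rcases (by omega : x % 2 = 0 ∨ x % 2 = 1) with hp | hp <;>
      rw [hp] <;> split_ifs <;> decide
  have h12 : ¬ (12 ≤ m) := by omega
  unfold rest_of_year daymonth_b
  simp only [h12, if_false, max_def, ediv2, emod2, hbx _ _ rfl]
  norm_num
  split_ifs <;> omega
lemma pyWhile_eq (a : Int) : ∀ (n : Nat) (m dAcc : Int), (12 - m).toNat ≤ n →
    pyWhile a m dAcc = dAcc + rest_of_year a m := by
  intro n
  induction n with
  | zero =>
      intro m dAcc hn
      rw [pyWhile]
      have h12 : ¬ m < 12 := by omega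
      simp [h12, rest_base a m (by omega)]
  | succ n ih =>
      intro m dAcc hn
      rw [pyWhile]
      by_cases h : m < 12
      · simp only [h, if_true]
        rw [ih (m + 1) _ (by omega), rest_step a m h, daymonth_agree]
        ring
      · simp [h, rest_base a m (by omega)]

-- ===== VERDICT (by name: the statement is the Claim_ definition above) =====
theorem pending_year_spec : Claim_equal_pending_year := by
  intro d m a _ _
  unfold Spec_pending_year pending_year pending_year_alt pending_month
  rw [pyWhile_eq a (12 - m).toNat m 0 le_rfl, daymonth_agree]
  ring
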